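-- pv_equiv track=rewrite | github.com/rafaelgoncalvesbarreira/eightqueen | nqueen.py | count_target_attack
-- ===== SOURCE A (Python) =====
-- import math
--
-- def count_target_attack(board):
--     '''
--     Return the cost from every column
--     '''
--     cost = []
--     for item_index,item in enumerate(board):
--         cost_item=0
--         for another_index,another in enumerate(board):
--             if item_index == another_index:
--                 continue
--             dif = math.fabs(item_index - another_index)
--             dif = int(dif)
--             if item == another:
--                 cost_item = cost_item + 1
--             if item + dif == another:
--                 cost_item = cost_item + 1
--             if item - dif == another:
--                 cost_item = cost_item + 1
--         cost.append(cost_item)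
--
--     return cost
-- ===== SOURCE B (Python) =====
-- def count_target_attack(board):
--     '''
--     Return the cost from every column
--     '''
--     rows = {}
--     diag = {}
--     anti = {}
--     for i, v in enumerate(board):
--         rows[v] = rows.get(v, 0) + 1
--         diag[v - i] = diag.get(v - i, 0) + 1
--         anti[v + i] = anti.get(v + i, 0) + 1
--     return [rows[v] + diag[v - i] + anti[v + i] - 3
--             for i, v in enumerate(board)]
-- ===== Notes on version B (the rewrite author's own statement) =====
-- stated objective: faster
-- what changed: Replaces the all-pairs inner scan by three frequency dictionaries (row value, value-index, value+index) built in one pass; each queen's cost is the sum of its three bucket counts minus 3 for itself.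
import Mathlib
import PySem

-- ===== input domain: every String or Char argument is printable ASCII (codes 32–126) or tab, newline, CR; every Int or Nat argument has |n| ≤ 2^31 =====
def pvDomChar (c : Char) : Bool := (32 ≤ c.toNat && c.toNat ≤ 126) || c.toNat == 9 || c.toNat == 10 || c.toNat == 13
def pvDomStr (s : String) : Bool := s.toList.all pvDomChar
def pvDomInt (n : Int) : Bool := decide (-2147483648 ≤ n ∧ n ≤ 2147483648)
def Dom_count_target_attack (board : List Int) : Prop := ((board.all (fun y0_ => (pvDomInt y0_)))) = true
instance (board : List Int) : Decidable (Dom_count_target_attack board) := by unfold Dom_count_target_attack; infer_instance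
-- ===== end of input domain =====

-- B replaces A's all-pairs inner scan by three one-pass frequency dictionaries (row, diagonal, anti-diagonal); asymptotically faster.


-- ===== PORT A =====
def count_target_attack (board : List Int) : List Int :=
  (PySem.List.enumerate board).foldl (fun cost p =>
    let costItem := (PySem.List.enumerate board).foldl (fun ci q =>
      if p.1 = q.1 then ci
      else
        let dif : Int := ((p.1 - q.1).natAbs : Int)
        let ci := if p.2 = q.2 then ci + 1 else ci
        let ci := if p.2 + dif = q.2 then ci + 1 else ci
        if p.2 - dif = q.2 then ci + 1 else ci) 0
    cost ++ [costItem]) []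

-- ===== PORT B =====
def count_target_attack_alt (board : List Int) : List Int :=
  let e := PySem.List.enumerate board
  let ds := e.foldl
    (fun (ds : PySem.Dict Int Int × PySem.Dict Int Int × PySem.Dict Int Int) p =>
      (ds.1.insert p.2 (ds.1.getD p.2 0 + 1),
       ds.2.1.insert (p.2 - p.1) (ds.2.1.getD (p.2 - p.1) 0 + 1),
       ds.2.2.insert (p.2 + p.1) (ds.2.2.getD (p.2 + p.1) 0 + 1)))
    (PySem.Dict.empty, PySem.Dict.empty, PySem.Dict.empty)
  e.map (fun p => ds.1.getD p.2 0 + ds.2.1.getD (p.2 - p.1) 0 + ds.2.2.getD (p.2 + p.1) 0 - 3)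

-- ===== PRECONDITION & SPEC =====
def Spec_count_target_attack (board : List Int) (out : List Int) : Prop := out = count_target_attack_alt board
instance (board : List Int) (out : List Int) : Decidable (Spec_count_target_attack board out) := by unfold Spec_count_target_attack; infer_instance

-- ===== CLAIM (what is proved, stated in full; the proofs are below) =====
def Claim_equal_count_target_attack : Prop := ∀ (board : List Int), Dom_count_target_attack board → Spec_count_target_attack board (count_target_attack board)

-- ===== LEMMAS AND PROOFS =====

-- A's per-pair contribution (0 when the indices coincide: the loop skips itself).
def pvContrib (p q : Int × Int) : Int :=
  if p.1 = q.1 then 0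
  else ((if p.2 = q.2 then (1:Int) else 0)
      + (if p.2 + ((p.1 - q.1).natAbs : Int) = q.2 then 1 else 0)
      + (if p.2 - ((p.1 - q.1).natAbs : Int) = q.2 then 1 else 0))

-- B's per-pair contribution (3 at the pair itself).
def pvG (p q : Int × Int) : Int :=
  (if q.2 = p.2 then (1:Int) else 0)
  + (if q.2 - q.1 = p.2 - p.1 then 1 else 0)
  + (if q.2 + q.1 = p.2 + p.1 then 1 else 0)

lemma pvContrib_eq_pvG (p q : Int × Int) (h : q.1 ≠ p.1) : pvContrib p q = pvG p q := by
  unfold pvContrib pvG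
  split_ifs <;> omega

lemma pvG_self (p : Int × Int) : pvG p p = 3 := by
  unfold pvG; simp

lemma pvContrib_self (p : Int × Int) : pvContrib p p = 0 := by
  unfold pvContrib; simp

lemma pv_sum_shift (p : Int × Int) (l : List (Int × Int)) (hp : p ∈ l)
    (hnd : l.Pairwise (fun a b => a.1 < b.1)) :
    (l.map (pvContrib p)).sum + 3 = (l.map (pvG p)).sum := by
  induction l with
  | nil => cases hp
  | cons q t ih =>
    rcases List.pairwise_cons.mp hnd with ⟨hq, ht⟩
    rcases List.mem_cons.mp hp with rfl | hpt
    · have hmap : t.map (pvContrib p) = t.map (pvG p) := by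
        apply List.map_congr_left
        intro r hr
        exact pvContrib_eq_pvG p r (by have := hq r hr; omega)
      simp [hmap, pvContrib_self, pvG_self]
      ring
    · have hq1 : q.1 ≠ p.1 := by have := hq p hpt; omega
      have := ih hpt ht
      simp [pvContrib_eq_pvG p q hq1] at this ⊢
      omega

-- A's inner loop step adds exactly pvContrib.
lemma pv_inner_step (p : Int × Int) (l : List (Int × Int)) (c : Int) :
    l.foldl (fun ci q =>
      if p.1 = q.1 then ci
      else
        let dif : Int := ((p.1 - q.1).natAbs : Int)
        let ci := if p.2 = q.2 then ci + 1 else ci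
        let ci := if p.2 + dif = q.2 then ci + 1 else ci
        if p.2 - dif = q.2 then ci + 1 else ci) c
    = l.foldl (fun ci q => ci + pvContrib p q) c := by
  apply PySem.List.foldl_congr_mem
  intro acc q _
  unfold pvContrib
  dsimp only
  split_ifs <;> omega

-- A 0/1 indicator sum over a list is a countP (Int-valued).
lemma pv_sum_ite (l : List (Int × Int)) (f : Int × Int → Int) (v : Int) :
    (l.map (fun q => if f q = v then (1:Int) else 0)).sum = ((l.map f).count v : Int) := by
  induction l with
  | nil => simp
  | cons q t ih =>
    by_cases h : f q = v
    · simp [h, ih]; omega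
    · simp [h, ih]

-- B's three folds are counters over the three projected lists.
lemma pv_alt_eq (board : List Int) :
    count_target_attack_alt board =
      (PySem.List.enumerate board).map (fun p =>
        (((PySem.List.enumerate board).map (·.2)).count p.2 : Int)
        + (((PySem.List.enumerate board).map (fun q => q.2 - q.1)).count (p.2 - p.1) : Int)
        + (((PySem.List.enumerate board).map (fun q => q.2 + q.1)).count (p.2 + p.1) : Int)
        - 3) := by
  unfold count_target_attack_alt
  dsimp only
  rw [PySem.List.foldl_prod_mk
        (f := fun (d : PySem.Dict Int Int) (p : Int × Int) => d.insert p.2 (d.getD p.2 0 + 1))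
        (g := fun (ds : PySem.Dict Int Int × PySem.Dict Int Int) (p : Int × Int) =>
          (ds.1.insert (p.2 - p.1) (ds.1.getD (p.2 - p.1) 0 + 1),
           ds.2.insert (p.2 + p.1) (ds.2.getD (p.2 + p.1) 0 + 1)))]
  rw [PySem.List.foldl_prod_mk
        (f := fun (d : PySem.Dict Int Int) (p : Int × Int) => d.insert (p.2 - p.1) (d.getD (p.2 - p.1) 0 + 1))
        (g := fun (d : PySem.Dict Int Int) (p : Int × Int) => d.insert (p.2 + p.1) (d.getD (p.2 + p.1) 0 + 1))]
  apply List.map_congr_left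
  intro p _
  dsimp only
  rw [← (@List.foldl_map (Int × Int) Int (PySem.Dict Int Int) (·.2)
        (fun d x => d.insert x (d.getD x 0 + 1)) (PySem.List.enumerate board) PySem.Dict.empty),
      ← (@List.foldl_map (Int × Int) Int (PySem.Dict Int Int) (fun q => q.2 - q.1)
        (fun d x => d.insert x (d.getD x 0 + 1)) (PySem.List.enumerate board) PySem.Dict.empty),
      ← (@List.foldl_map (Int × Int) Int (PySem.Dict Int Int) (fun q => q.2 + q.1)
        (fun d x => d.insert x (d.getD x 0 + 1)) (PySem.List.enumerate board) PySem.Dict.empty)]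
  simp [PySem.Dict.getD_foldl_insert_add_one]

-- ===== VERDICT (by name: the statement is the Claim_ definition above) =====
theorem count_target_attack_spec : Claim_equal_count_target_attack := by
  intro board _
  unfold Spec_count_target_attack
  rw [pv_alt_eq]
  unfold count_target_attack
  rw [PySem.List.foldl_append_singleton_eq_map]
  simp only [List.nil_append]
  apply List.map_congr_left
  intro p hp
  rw [pv_inner_step, PySem.List.foldl_add (g := pvContrib p)]
  have hsum := pv_sum_shift p (PySem.List.enumerate board) hp
      (PySem.List.pairwise_lt_enumerate board 0)
  have h1 : ((PySem.List.enumerate board).map (pvG p)).sum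
      = (((PySem.List.enumerate board).map (·.2)).count p.2 : Int)
        + (((PySem.List.enumerate board).map (fun q => q.2 - q.1)).count (p.2 - p.1) : Int)
        + (((PySem.List.enumerate board).map (fun q => q.2 + q.1)).count (p.2 + p.1) : Int) := by
    rw [← pv_sum_ite _ (·.2) p.2, ← pv_sum_ite _ (fun q => q.2 - q.1) (p.2 - p.1),
        ← pv_sum_ite _ (fun q => q.2 + q.1) (p.2 + p.1)]
    unfold pvG
    rw [PySem.List.sum_map_add_int, PySem.List.sum_map_add_int]
  omega
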